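-- pv_equiv track=rewrite | github.com/MrBrantCode/unitest_baseline | mut_generate/mist_train_cf/cf_86389/solution.py | sort_words
-- ===== SOURCE A (Python) =====
-- def sort_words(words):
--     words = [word.lower() for word in words]
--     n = len(words)
--     swapped = True
--     while swapped:
--         swapped = False
--         for i in range(n - 1):
--             if (len(words[i]), words[i]) > (len(words[i + 1]), words[i + 1]):
--                 words[i], words[i + 1] = words[i + 1], words[i]
--                 swapped = True
--
--     return set(words)
-- ===== SOURCE B (Python) =====
-- def sort_words(words):
--     return set(sorted((w.lower() for w in words), key=lambda w: (len(w), w)))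
-- ===== Notes on version B (the rewrite author's own statement) =====
-- stated objective: faster
-- what changed: Replaces the hand-written repeated bubble-sort passes with a single built-in sorted() call with the same (len, word) key, then builds the set of lowercased words in one expression.
import Mathlib
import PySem

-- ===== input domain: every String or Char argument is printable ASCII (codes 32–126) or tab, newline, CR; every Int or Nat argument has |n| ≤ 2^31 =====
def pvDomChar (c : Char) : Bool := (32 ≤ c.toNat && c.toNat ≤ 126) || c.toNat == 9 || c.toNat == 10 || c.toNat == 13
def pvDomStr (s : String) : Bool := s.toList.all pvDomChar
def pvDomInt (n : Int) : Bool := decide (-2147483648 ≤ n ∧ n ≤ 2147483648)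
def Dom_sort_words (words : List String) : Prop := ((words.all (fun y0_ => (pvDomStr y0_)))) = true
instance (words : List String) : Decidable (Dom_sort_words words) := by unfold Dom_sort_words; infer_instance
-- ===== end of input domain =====

-- B replaces A's repeated bubble-sort passes with one library sort (same (len, word) key) before
-- building the set of lowercased words; equivalence of the RETURN value is proved (A does not
-- mutate its caller-visible argument: it rebinds `words` to a fresh list).

-- ===== PORT A =====
-- Python tuple comparison (len(a), a) > (len(b), b): first components, then the strings.
def pvKeyGt (a b : String) : Bool :=
  decide (PySem.Str.len b < PySem.Str.len a) ||
    (decide (PySem.Str.len a = PySem.Str.len b) && decide (b < a))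

-- one inner `for i in range(n-1)` pass of adjacent compare-and-swap over the list,
-- returning the rewritten list and the `swapped` flag (the in-place index loop as
-- the standard structural bubble pass over the same state).
def pvPass : List String → List String × Bool
  | [] => ([], false)
  | [x] => ([x], false)
  | x :: y :: rest =>
    if pvKeyGt x y then
      (y :: (pvPass (x :: rest)).1, true)
    else
      (x :: (pvPass (y :: rest)).1, (pvPass (y :: rest)).2)

-- the `while swapped` loop; the fuel argument only makes it total (a guard, not a change of
-- algorithm): length+1 passes provably suffice to reach a pass with no swap (proved below).
def pvLoop : Nat → List String → List String
  | 0, xs => xs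
  | f + 1, xs => if (pvPass xs).2 then pvLoop f (pvPass xs).1 else (pvPass xs).1

def sort_words (words : List String) : List String :=
  let ws := words.map PySem.Str.lower
  PySem.Set.ofList (pvLoop (ws.length + 1) ws)

-- ===== PORT B =====
def sort_words_alt (words : List String) : List String :=
  PySem.Set.ofList
    (PySem.List.sorted2 (words.map PySem.Str.lower) (fun w => PySem.Str.len w) (fun w => w) false)

-- ===== PRECONDITION & SPEC =====
def Spec_sort_words (words : List String) (out : List String) : Prop := out = sort_words_alt words
instance (words : List String) (out : List String) : Decidable (Spec_sort_words words out) := by unfold Spec_sort_words; infer_instance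

-- ===== CLAIM (what is proved, stated in full; the proofs are below) =====
def Claim_equal_sort_words : Prop := ∀ (words : List String), Dom_sort_words words → Spec_sort_words words (sort_words words)

-- ===== LEMMAS AND PROOFS =====

-- the strict (len, word) key order and its reflexive closure
def pvKlt (a b : String) : Prop :=
  PySem.Str.len a < PySem.Str.len b ∨ (PySem.Str.len a = PySem.Str.len b ∧ a < b)

def pvKle (a b : String) : Prop := pvKlt a b ∨ a = b

theorem pvKlt_trans {a b c : String} (h1 : pvKlt a b) (h2 : pvKlt b c) : pvKlt a c := by
  rcases h1 with h1 | ⟨e1, s1⟩ <;> rcases h2 with h2 | ⟨e2, s2⟩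
  · exact Or.inl (lt_trans h1 h2)
  · exact Or.inl (e2 ▸ h1)
  · exact Or.inl (e1 ▸ h2)
  · exact Or.inr ⟨e1.trans e2, lt_trans s1 s2⟩

theorem pvKlt_asymm {a b : String} (h1 : pvKlt a b) (h2 : pvKlt b a) : False := by
  rcases h1 with h1 | ⟨e1, s1⟩ <;> rcases h2 with h2 | ⟨e2, s2⟩
  · omega
  · omega
  · omega
  · exact absurd s2 (not_lt_of_gt s1)

theorem pvKlt_irrefl (a : String) : ¬ pvKlt a a := fun h => pvKlt_asymm h h

theorem pvKle_trans {a b c : String} (h1 : pvKle a b) (h2 : pvKle b c) : pvKle a c := by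
  rcases h1 with h1 | rfl
  · rcases h2 with h2 | rfl
    · exact Or.inl (pvKlt_trans h1 h2)
    · exact Or.inl h1
  · exact h2

theorem pvK_trichotomy (a b : String) : pvKlt a b ∨ a = b ∨ pvKlt b a := by
  rcases lt_trichotomy (PySem.Str.len a) (PySem.Str.len b) with h | h | h
  · exact Or.inl (Or.inl h)
  · rcases lt_trichotomy a b with hs | hs | hs
    · exact Or.inl (Or.inr ⟨h, hs⟩)
    · exact Or.inr (Or.inl hs)
    · exact Or.inr (Or.inr (Or.inr ⟨h.symm, hs⟩))
  · exact Or.inr (Or.inr (Or.inl h))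

theorem pvKle_of_not_klt {a b : String} (h : ¬ pvKlt b a) : pvKle a b := by
  rcases pvK_trichotomy a b with h1 | h1 | h1
  · exact Or.inl h1
  · exact Or.inr h1
  · exact absurd h1 h

theorem pvKeyGt_true_iff (a b : String) : pvKeyGt a b = true ↔ pvKlt b a := by
  simp [pvKeyGt, pvKlt]
  constructor
  · rintro (h | ⟨h1, h2⟩)
    · exact Or.inl h
    · exact Or.inr ⟨h1.symm, h2⟩
  · rintro (h | ⟨h1, h2⟩)
    · exact Or.inl h
    · exact Or.inr ⟨h1.symm, h2⟩

theorem pvKeyGt_false_of_kle {a b : String} (h : pvKle a b) : pvKeyGt a b = false := by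
  rcases Bool.eq_false_or_eq_true (pvKeyGt a b) with ht | hf
  · exfalso
    have hba : pvKlt b a := (pvKeyGt_true_iff a b).1 ht
    rcases h with h | rfl
    · exact pvKlt_asymm h hba
    · exact pvKlt_irrefl a hba
  · exact hf

theorem pvKle_of_keyGt_false {a b : String} (h : pvKeyGt a b = false) : pvKle a b := by
  apply pvKle_of_not_klt
  intro hba
  rw [(pvKeyGt_true_iff a b).2 hba] at h
  simp at h

-- a pass on an already-ordered list makes no swap and does not change the list
theorem pvPass_of_pairwise : ∀ (xs : List String), xs.Pairwise pvKle → pvPass xs = (xs, false)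
  | [], _ => by simp [pvPass]
  | [_], _ => by simp [pvPass]
  | x :: y :: rest, h => by
    have hxy : pvKle x y := (List.pairwise_cons.1 h).1 y (by simp)
    have htail : (y :: rest).Pairwise pvKle := (List.pairwise_cons.1 h).2
    have hrec := pvPass_of_pairwise (y :: rest) htail
    simp [pvPass, pvKeyGt_false_of_kle hxy, hrec]

-- a no-swap pass certifies the list ordered (and unchanged)
theorem pvPass_snd_false : ∀ (xs : List String),
    (pvPass xs).2 = false → (pvPass xs).1 = xs ∧ xs.Pairwise pvKle
  | [], _ => ⟨by simp [pvPass], List.Pairwise.nil⟩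
  | [x], _ => ⟨by simp [pvPass], by simp⟩
  | x :: y :: rest, h => by
    by_cases hg : pvKeyGt x y = true
    · simp [pvPass, hg] at h
    · have hg' : pvKeyGt x y = false := by simpa using hg
      have h2 : (pvPass (y :: rest)).2 = false := by simpa [pvPass, hg'] using h
      obtain ⟨he, hp⟩ := pvPass_snd_false (y :: rest) h2
      refine ⟨by simp [pvPass, hg', he], ?_⟩
      refine List.pairwise_cons.2 ⟨?_, hp⟩
      intro z hz
      rcases List.mem_cons.1 hz with rfl | hz
      · exact pvKle_of_keyGt_false hg'
      · exact pvKle_trans (pvKle_of_keyGt_false hg') (List.rel_of_pairwise_cons hp hz)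

theorem pvPass_perm : ∀ (xs : List String), (pvPass xs).1.Perm xs
  | [] => by simp [pvPass]
  | [x] => by simp [pvPass]
  | x :: y :: rest => by
    by_cases hg : pvKeyGt x y = true
    · simp only [pvPass, hg, if_true]
      exact ((pvPass_perm (x :: rest)).cons y).trans (List.Perm.swap x y rest)
    · have hg' : pvKeyGt x y = false := by simpa using hg
      simp only [pvPass, hg', Bool.false_eq_true, if_false]
      exact (pvPass_perm (y :: rest)).cons x

-- a pass pushes a maximum to the end
theorem pvPass_max : ∀ (xs : List String), xs ≠ [] →
    ∃ zs m, (pvPass xs).1 = zs ++ [m] ∧ ∀ a ∈ xs, pvKle a m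
  | [], h => absurd rfl h
  | [x], _ => ⟨[], x, by simp [pvPass], by simp [pvKle]⟩
  | x :: y :: rest, _ => by
    by_cases hg : pvKeyGt x y = true
    · obtain ⟨zs, m, he, hm⟩ := pvPass_max (x :: rest) (by simp)
      refine ⟨y :: zs, m, by simp [pvPass, hg, he], ?_⟩
      intro a ha
      rcases List.mem_cons.1 ha with rfl | ha
      · exact hm a (by simp)
      · rcases List.mem_cons.1 ha with rfl | ha
        · exact pvKle_trans (Or.inl ((pvKeyGt_true_iff x a).1 hg)) (hm x (by simp))
        · exact hm a (by simp [ha])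
    · have hg' : pvKeyGt x y = false := by simpa using hg
      obtain ⟨zs, m, he, hm⟩ := pvPass_max (y :: rest) (by simp)
      refine ⟨x :: zs, m, by simp [pvPass, hg', he], ?_⟩
      intro a ha
      rcases List.mem_cons.1 ha with rfl | ha
      · exact pvKle_trans (pvKle_of_keyGt_false hg') (hm y (by simp))
      · exact hm a ha

-- an ordered dominating suffix passes through a pass untouched
theorem pvPass_append_sorted : ∀ (as bs : List String), as ≠ [] → bs.Pairwise pvKle →
    (∀ a ∈ as, ∀ b ∈ bs, pvKle a b) →
    pvPass (as ++ bs) = ((pvPass as).1 ++ bs, (pvPass as).2)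
  | [], _, h, _, _ => absurd rfl h
  | [x], bs, _, hb, hcross => by
    have hp : (x :: bs).Pairwise pvKle :=
      List.pairwise_cons.2 ⟨fun b hbmem => hcross x (by simp) b hbmem, hb⟩
    simpa [pvPass] using pvPass_of_pairwise (x :: bs) hp
  | x :: y :: rest, bs, _, hb, hcross => by
    by_cases hg : pvKeyGt x y = true
    · have ih := pvPass_append_sorted (x :: rest) bs (by simp) hb
        (fun a ha b hbmem => hcross a (by rcases List.mem_cons.1 ha with rfl | ha <;> simp [ha]) b hbmem)
      simp only [List.cons_append, pvPass, hg, if_true]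
      rw [show x :: (rest ++ bs) = (x :: rest) ++ bs from rfl, ih]
    · have hg' : pvKeyGt x y = false := by simpa using hg
      have ih := pvPass_append_sorted (y :: rest) bs (by simp) hb
        (fun a ha b hbmem => hcross a (by rcases List.mem_cons.1 ha with rfl | ha <;> simp [ha]) b hbmem)
      simp only [List.cons_append, pvPass, hg', Bool.false_eq_true, if_false]
      rw [show y :: (rest ++ bs) = (y :: rest) ++ bs from rfl, ih]

theorem pvLoop_succ (f : Nat) (xs : List String) :
    pvLoop (f + 1) xs = if (pvPass xs).2 then pvLoop f (pvPass xs).1 else (pvPass xs).1 := rfl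

-- the while-loop with fuel ≥ (length of the unsorted prefix) + 1 sorts: invariant induction
theorem pvLoop_sorts : ∀ (n : Nat) (as bs : List String), as.length ≤ n →
    bs.Pairwise pvKle → (∀ a ∈ as, ∀ b ∈ bs, pvKle a b) →
    (pvLoop (n + 1) (as ++ bs)).Pairwise pvKle ∧ (pvLoop (n + 1) (as ++ bs)).Perm (as ++ bs) := by
  intro n
  induction n with
  | zero =>
    intro as bs hlen hb _
    have : as = [] := List.eq_nil_of_length_eq_zero (Nat.le_zero.1 hlen)
    subst this
    rw [List.nil_append, pvLoop_succ, pvPass_of_pairwise bs hb]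
    simp [hb]
  | succ n ih =>
    intro as bs hlen hb hcross
    rcases as with _ | ⟨a0, as'⟩
    · rw [List.nil_append, pvLoop_succ, pvPass_of_pairwise bs hb]
      simp [hb]
    · set as := a0 :: as' with has
      have hne : as ≠ [] := by simp [has]
      have hS := pvPass_append_sorted as bs hne hb hcross
      by_cases hsw : (pvPass as).2 = true
      · obtain ⟨zs, m, he, hm⟩ := pvPass_max as hne
        have hperm1 : (pvPass as).1.Perm as := pvPass_perm as
        have hmem : ∀ z ∈ zs, z ∈ as := by
          intro z hz
          exact hperm1.mem_iff.1 (by simp [he, hz])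
        have hmmem : m ∈ as := hperm1.mem_iff.1 (by simp [he])
        have hlz : zs.length ≤ n := by
          have h1 : (pvPass as).1.length = as.length := hperm1.length_eq
          rw [he] at h1
          simp at h1
          omega
        have hb' : (m :: bs).Pairwise pvKle :=
          List.pairwise_cons.2 ⟨fun b hbmem => hcross m hmmem b hbmem, hb⟩
        have hcross' : ∀ a ∈ zs, ∀ b ∈ m :: bs, pvKle a b := by
          intro a ha b hbmem
          rcases List.mem_cons.1 hbmem with rfl | hbmem
          · exact hm a (hmem a ha)
          · exact hcross a (hmem a ha) b hbmem
        have ihz := ih zs (m :: bs) hlz hb' hcross'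
        have heq : pvLoop (n + 1 + 1) (as ++ bs) = pvLoop (n + 1) (zs ++ (m :: bs)) := by
          have h2 : (pvPass (as ++ bs)).2 = true := by rw [hS]; exact hsw
          rw [pvLoop_succ, if_pos h2, hS]
          simp only [he, List.append_assoc, List.singleton_append]
        rw [heq]
        refine ⟨ihz.1, ihz.2.trans ?_⟩
        have he2 : zs ++ (m :: bs) = (pvPass as).1 ++ bs := by rw [he]; simp
        rw [he2]
        exact hperm1.append_right bs
      · have hsw' : (pvPass as).2 = false := by simpa using hsw
        obtain ⟨he, hp⟩ := pvPass_snd_false as hsw'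
        have heq : pvLoop (n + 1 + 1) (as ++ bs) = as ++ bs := by
          have h2 : (pvPass (as ++ bs)).2 = false := by rw [hS]; exact hsw'
          rw [pvLoop_succ, h2, if_neg (by simp), hS, he]
        rw [heq]
        refine ⟨List.pairwise_append.2 ⟨hp, hb, hcross⟩, List.Perm.refl _⟩

theorem pvLoop_main (ws : List String) :
    (pvLoop (ws.length + 1) ws).Pairwise pvKle ∧ (pvLoop (ws.length + 1) ws).Perm ws := by
  have h := pvLoop_sorts ws.length ws [] (le_refl _) List.Pairwise.nil (by simp)
  simpa using h

-- B's sorted2 comparator is exactly the strict key order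
theorem pvLt2_iff (a b : String) :
    (decide (PySem.Str.len a < PySem.Str.len b) ||
      (!decide (PySem.Str.len b < PySem.Str.len a) && decide (a < b))) = true ↔ pvKlt a b := by
  simp only [Bool.or_eq_true, Bool.and_eq_true, Bool.not_eq_eq_eq_not, Bool.not_true,
    decide_eq_true_eq, decide_eq_false_iff_not, pvKlt]
  constructor
  · rintro (h | ⟨h1, h2⟩)
    · exact Or.inl h
    · rcases lt_or_eq_of_le (le_of_not_gt h1) with h3 | h3
      · exact Or.inl h3
      · exact Or.inr ⟨h3, h2⟩
  · rintro (h | ⟨h1, h2⟩)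
    · exact Or.inl h
    · exact Or.inr ⟨by omega, h2⟩

theorem pvInsertBy_pairwise (x : String) : ∀ (ys : List String), ys.Pairwise pvKle →
    (PySem.List.insertBy (fun a b =>
        decide (PySem.Str.len a < PySem.Str.len b) ||
          (!decide (PySem.Str.len b < PySem.Str.len a) && decide (a < b))) x ys).Pairwise pvKle
  | [], _ => by simp [PySem.List.insertBy]
  | y :: ys, h => by
    by_cases hl : (decide (PySem.Str.len x < PySem.Str.len y) ||
        (!decide (PySem.Str.len y < PySem.Str.len x) && decide (x < y))) = true
    · have hxy : pvKlt x y := (pvLt2_iff x y).1 hl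
      simp only [PySem.List.insertBy, hl, if_true]
      refine List.pairwise_cons.2 ⟨?_, h⟩
      intro z hz
      rcases List.mem_cons.1 hz with rfl | hz
      · exact Or.inl hxy
      · exact pvKle_trans (Or.inl hxy)
          (List.rel_of_pairwise_cons h hz)
    · have hxy : pvKle y x := by
        apply pvKle_of_not_klt
        intro hk
        exact hl ((pvLt2_iff x y).2 hk)
      have hl' : (decide (PySem.Str.len x < PySem.Str.len y) ||
          (!decide (PySem.Str.len y < PySem.Str.len x) && decide (x < y))) = false := by
        simpa using hl
      simp only [PySem.List.insertBy, hl', Bool.false_eq_true, if_false]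
      refine List.pairwise_cons.2 ⟨?_, pvInsertBy_pairwise x ys (List.pairwise_cons.1 h).2⟩
      intro z hz
      rcases (PySem.List.mem_insertBy _ _ _ _).1 hz with rfl | hz
      · exact hxy
      · exact (List.pairwise_cons.1 h).1 z hz

theorem pvFoldl_insertBy_pairwise : ∀ (xs acc : List String), acc.Pairwise pvKle →
    (xs.foldl (fun acc x => PySem.List.insertBy (fun a b =>
        decide (PySem.Str.len a < PySem.Str.len b) ||
          (!decide (PySem.Str.len b < PySem.Str.len a) && decide (a < b))) x acc) acc).Pairwise pvKle
  | [], _, h => h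
  | x :: xs, acc, h => by
    simpa [List.foldl] using pvFoldl_insertBy_pairwise xs _ (pvInsertBy_pairwise x acc h)

theorem pvSorted2_pairwise (ws : List String) :
    (PySem.List.sorted2 ws (fun w => PySem.Str.len w) (fun w => w) false).Pairwise pvKle := by
  have h : PySem.List.sorted2 ws (fun w => PySem.Str.len w) (fun w => w) false
      = ws.foldl (fun acc x => PySem.List.insertBy (fun a b =>
          decide (PySem.Str.len a < PySem.Str.len b) ||
            (!decide (PySem.Str.len b < PySem.Str.len a) && decide (a < b))) x acc) [] := rfl
  rw [h]
  exact pvFoldl_insertBy_pairwise ws [] List.Pairwise.nil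

theorem pvLoop_eq_sorted2 (ws : List String) :
    pvLoop (ws.length + 1) ws = PySem.List.sorted2 ws (fun w => PySem.Str.len w) (fun w => w) false := by
  haveI : Std.Antisymm pvKle := ⟨by
    intro a b h1 h2
    rcases h1 with h1 | rfl
    · rcases h2 with h2 | rfl
      · exact absurd h2 (fun h => pvKlt_asymm h1 h)
      · rfl
    · rfl⟩
  obtain ⟨hpw, hperm⟩ := pvLoop_main ws
  exact List.Perm.eq_of_pairwise' hpw (pvSorted2_pairwise ws)
    (hperm.trans (PySem.List.sorted2_perm ws _ _ false).symm)

-- ===== VERDICT (by name: the statement is the Claim_ definition above) =====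
theorem sort_words_spec : Claim_equal_sort_words := by
  intro words _
  unfold Spec_sort_words sort_words sort_words_alt
  simp only []
  rw [pvLoop_eq_sorted2 (words.map PySem.Str.lower)]
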